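-- pv_equiv track=rewrite | github.com/sohaibMan/GraphTheory | flask/algorithms/depth_first_search.py | dfs_edges
-- ===== SOURCE A (Python) =====
-- def dfs_edges(graphs, source=None, depth_limit=None):
--     visited = set()
--     if depth_limit is None:
--         depth_limit = len(graphs)
--     for start in [source]:
--         if start in visited:
--             continue
--         visited.add(start)
--         stack = [(start, depth_limit, iter(graphs[start]))]
--         while stack:
--             parent, depth_now, children = stack[-1]
--             try:
--                 child = next(children)
--                 if child not in visited:
--                     yield parent, child
--                     visited.add(child)
--                     if depth_now > 1:
--                         stack.append((child, depth_now - 1, iter(graphs[child])))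
--             except StopIteration:
--                 stack.pop()
-- ===== SOURCE B (Python) =====
-- def dfs_edges(graphs, source=None, depth_limit=None):
--     if depth_limit is None:
--         depth_limit = len(graphs)
--     visited = {source}
--
--     def recurse(parent, depth):
--         for child in graphs[parent]:
--             if child not in visited:
--                 visited.add(child)
--                 yield parent, child
--                 if depth > 1:
--                     yield from recurse(child, depth - 1)
--
--     yield from recurse(source, depth_limit)
-- ===== Notes on version B (the rewrite author's own statement) =====
-- stated objective: simpler
-- what changed: Replaces A's explicit stack of (node, depth, iterator) triples driven by a while/try-next loop with a recursive generator helper recurse(parent, depth) over the adjacency list, using the call stack to produce the same preorder edges.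
import Mathlib
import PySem

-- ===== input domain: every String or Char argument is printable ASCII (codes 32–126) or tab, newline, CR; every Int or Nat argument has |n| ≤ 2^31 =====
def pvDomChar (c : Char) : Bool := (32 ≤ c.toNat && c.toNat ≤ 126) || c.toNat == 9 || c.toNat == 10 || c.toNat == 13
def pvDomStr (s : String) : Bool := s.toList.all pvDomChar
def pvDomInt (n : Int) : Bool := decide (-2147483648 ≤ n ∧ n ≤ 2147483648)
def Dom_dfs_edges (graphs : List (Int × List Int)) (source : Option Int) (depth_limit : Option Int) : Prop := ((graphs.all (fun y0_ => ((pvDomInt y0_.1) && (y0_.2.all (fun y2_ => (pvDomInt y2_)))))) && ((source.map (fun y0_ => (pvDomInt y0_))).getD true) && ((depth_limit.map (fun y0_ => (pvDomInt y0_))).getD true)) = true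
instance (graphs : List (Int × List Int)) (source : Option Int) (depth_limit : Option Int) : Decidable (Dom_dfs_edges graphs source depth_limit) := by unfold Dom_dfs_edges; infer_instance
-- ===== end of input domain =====

-- B replaces A's explicit stack of (node, depth, iterator) triples by a recursive generator
-- (call-stack recursion over the adjacency list), same edges in the same preorder; objective: simpler.

-- ===== PORT A =====
-- graphs is a Python dict; graphs[k] (KeyError excluded by Pre_) ported as getD [].
def dfsAdj (graphs : List (Int × List Int)) (k : Int) : List Int :=
  ((PySem.Dict.mk graphs).get? k).getD []

-- bound on the length of any adjacency list (used only for termination of the A-port)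
def dfsMaxAdj (graphs : List (Int × List Int)) : Nat :=
  (graphs.map (fun p => p.2.length)).foldr max 0

lemma dfsAdj_length_le (graphs : List (Int × List Int)) (k : Int) :
    (dfsAdj graphs k).length ≤ dfsMaxAdj graphs := by
  induction graphs with
  | nil => simp [dfsAdj, dfsMaxAdj, PySem.Dict.get?]
  | cons h t ih =>
    simp only [dfsAdj, dfsMaxAdj, List.map_cons, List.foldr_cons] at *
    rw [PySem.Dict.get?_mk_cons]
    split
    · simp
    · exact le_trans ih (le_max_right _ _)

-- termination measure for the stack machine
def dfsMeasure (M : Nat) (stack : List (Int × Int × List Int)) : Nat :=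
  (stack.map (fun f => (f.2.2.length + 1) * (M + 2) ^ f.2.1.toNat)).sum

-- A's while-stack loop: each frame is (parent, depth_now, remaining children of the iterator)
def dfsALoop (graphs : List (Int × List Int)) (vis : PySem.Set Int)
    (stack : List (Int × Int × List Int)) : List (Int × Int) :=
  match stack with
  | [] => []
  | (p, d, cs) :: st =>
    match cs with
    | [] => dfsALoop graphs vis st                     -- StopIteration: stack.pop()
    | c :: cs' =>
      if PySem.Set.contains vis c then
        dfsALoop graphs vis ((p, d, cs') :: st)        -- child already visited
      else if 1 < d then
        (p, c) :: dfsALoop graphs (PySem.Set.add vis c)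
          ((c, d - 1, dfsAdj graphs c) :: (p, d, cs') :: st)
      else
        (p, c) :: dfsALoop graphs (PySem.Set.add vis c) ((p, d, cs') :: st)
termination_by dfsMeasure (dfsMaxAdj graphs) stack
decreasing_by
  · -- pop
    simp only [dfsMeasure, List.map_cons, List.sum_cons]
    have h1 : 0 < (dfsMaxAdj graphs + 2) ^ d.toNat := Nat.pow_pos (by omega)
    nlinarith
  · -- skip visited child
    simp only [dfsMeasure, List.map_cons, List.sum_cons, List.length_cons]
    have h1 : 0 < (dfsMaxAdj graphs + 2) ^ d.toNat := Nat.pow_pos (by omega)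
    nlinarith
  · -- push a new frame (1 < d)
    simp only [dfsMeasure, List.map_cons, List.sum_cons, List.length_cons]
    have hk : d.toNat = (d - 1).toNat + 1 := by omega
    have hpos : 0 < (dfsMaxAdj graphs + 2) ^ (d - 1).toNat := Nat.pow_pos (by omega)
    have hadj : (dfsAdj graphs c).length ≤ dfsMaxAdj graphs := dfsAdj_length_le graphs c
    rw [hk, pow_succ]
    nlinarith
  · -- yield without push (d ≤ 1)
    simp only [dfsMeasure, List.map_cons, List.sum_cons, List.length_cons]
    have h1 : 0 < (dfsMaxAdj graphs + 2) ^ d.toNat := Nat.pow_pos (by omega)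
    nlinarith

def dfs_edges (graphs : List (Int × List Int)) (source : Option Int) (depth_limit : Option Int) : List (Int × Int) :=
  -- visited = set(); for start in [source]: the 'if start in visited: continue' guard is dead
  -- (visited is empty at that point); source = None hits graphs[None] → KeyError, excluded by Pre_.
  match source with
  | none => []
  | some s =>
    let dl : Int := match depth_limit with
      | none => (graphs.length : Int)
      | some d => d
    dfsALoop graphs (PySem.Set.add PySem.Set.empty s) [(s, dl, dfsAdj graphs s)]

-- ===== PORT B =====
-- recurse(parent, depth) over the remaining children cs; returns (yielded edges, visited set)
def dfsBRec (graphs : List (Int × List Int)) (vis : PySem.Set Int)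
    (p : Int) (d : Int) (cs : List Int) : List (Int × Int) × PySem.Set Int :=
  match cs with
  | [] => ([], vis)
  | c :: cs' =>
    if PySem.Set.contains vis c then dfsBRec graphs vis p d cs'
    else if 1 < d then
      let r1 := dfsBRec graphs (PySem.Set.add vis c) c (d - 1) (dfsAdj graphs c)
      let r2 := dfsBRec graphs r1.2 p d cs'
      ((p, c) :: (r1.1 ++ r2.1), r2.2)
    else
      let r2 := dfsBRec graphs (PySem.Set.add vis c) p d cs'
      ((p, c) :: r2.1, r2.2)
termination_by (d.toNat, cs.length)

def dfs_edges_alt (graphs : List (Int × List Int)) (source : Option Int) (depth_limit : Option Int) : List (Int × Int) :=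
  match source with
  | none => []     -- B's graphs[None] also raises; excluded by Pre_
  | some s =>
    let dl : Int := (depth_limit.getD (graphs.length : Int))
    (dfsBRec graphs (PySem.Set.ofList [s]) s dl (dfsAdj graphs s)).1

-- ===== PRECONDITION & SPEC =====
-- first-match association-list lookup (only for Pre_; graphs stands for a Python dict)
def dfsLook (graphs : List (Int × List Int)) (k : Int) : List Int :=
  (graphs.lookup k).getD []

-- nodes reachable from s in at most n steps, expanding only nodes that are keys
def dfsReach (graphs : List (Int × List Int)) (s : Int) : Nat → List Int
  | 0 => [s]
  | n + 1 =>
    let R := dfsReach graphs s n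
    PySem.Set.update R (R.flatMap (fun v => dfsLook graphs v))

-- Pre_ excludes inputs where Python A raises KeyError (source None or not a key; an assoc list
-- with duplicate keys does not arise from a Python dict) via a closed-form graph condition:
-- every node reachable from the source within depth_limit - 1 steps must be a key. This slightly
-- over-approximates the nodes A actually touches (A's already-visited pruning can skip a missing
-- node), so a few inputs on which A returns are excluded; B returns the same value there (cites).
def Pre_dfs_edges (graphs : List (Int × List Int)) (source : Option Int) (depth_limit : Option Int) : Prop :=
  (graphs.map Prod.fst).Nodup ∧
  ∃ s ∈ graphs.map Prod.fst, source = some s ∧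
    ∀ v ∈ dfsReach graphs s
      (min ((depth_limit.getD (graphs.length : Int)) - 1).toNat
           (graphs.length + (graphs.map (fun p => p.2.length)).sum)),
      v ∈ graphs.map Prod.fst
instance (graphs : List (Int × List Int)) (source : Option Int) (depth_limit : Option Int) : Decidable (Pre_dfs_edges graphs source depth_limit) := by unfold Pre_dfs_edges; infer_instance

def pvWitness_dfs_edges : (List (Int × List Int)) × Option Int × Option Int :=
  ([(0, [1, 2]), (1, [0, 2]), (2, [])], some 0, none)

def Spec_dfs_edges (graphs : List (Int × List Int)) (source : Option Int) (depth_limit : Option Int) (out : List (Int × Int)) : Prop := out = dfs_edges_alt graphs source depth_limit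
instance (graphs : List (Int × List Int)) (source : Option Int) (depth_limit : Option Int) (out : List (Int × Int)) : Decidable (Spec_dfs_edges graphs source depth_limit out) := by unfold Spec_dfs_edges; infer_instance

-- ===== CLAIM (what is proved, stated in full; the proofs are below) =====
def Claim_equal_dfs_edges : Prop := ∀ (graphs : List (Int × List Int)) (source : Option Int) (depth_limit : Option Int), Dom_dfs_edges graphs source depth_limit → Pre_dfs_edges graphs source depth_limit → Spec_dfs_edges graphs source depth_limit (dfs_edges graphs source depth_limit)

-- ===== LEMMAS AND PROOFS =====

-- evaluating a whole stack with B's recursion, threading the visited set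
def dfsStackEval (graphs : List (Int × List Int)) :
    PySem.Set Int → List (Int × Int × List Int) → List (Int × Int)
  | _, [] => []
  | vis, (p, d, cs) :: st =>
    (dfsBRec graphs vis p d cs).1 ++ dfsStackEval graphs (dfsBRec graphs vis p d cs).2 st

lemma dfsALoop_eq_stackEval (graphs : List (Int × List Int))
    (vis : PySem.Set Int) (stack : List (Int × Int × List Int)) :
    dfsALoop graphs vis stack = dfsStackEval graphs vis stack := by
  fun_induction dfsALoop graphs vis stack with
  | case1 => simp [dfsStackEval]
  | case2 vis p d st ih =>
    rw [ih]; simp [dfsStackEval, dfsBRec]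
  | case3 vis p d st c cs' h ih =>
    have hm : c ∈ vis := by simpa using h
    rw [ih]; simp [dfsStackEval, dfsBRec, hm]
  | case4 vis p d st c cs' h hd ih =>
    have hm : c ∉ vis := by simpa using h
    rw [ih]; simp [dfsStackEval, dfsBRec, hm, hd]
  | case5 vis p d st c cs' h hd ih =>
    have hm : c ∉ vis := by simpa using h
    rw [ih]; simp [dfsStackEval, dfsBRec, hm, hd]

theorem dfs_edges_eq_alt (graphs : List (Int × List Int)) (source : Option Int)
    (depth_limit : Option Int) :
    dfs_edges graphs source depth_limit = dfs_edges_alt graphs source depth_limit := by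
  cases source with
  | none => rfl
  | some s =>
    cases depth_limit with
    | none =>
      simp only [dfs_edges, dfs_edges_alt, Option.getD]
      rw [dfsALoop_eq_stackEval]
      simp [dfsStackEval, PySem.Set.ofList, PySem.Set.empty]
    | some d =>
      simp only [dfs_edges, dfs_edges_alt, Option.getD]
      rw [dfsALoop_eq_stackEval]
      simp [dfsStackEval, PySem.Set.ofList, PySem.Set.empty]

-- ===== VERDICT (by name: the statement is the Claim_ definition above) =====
theorem dfs_edges_spec : Claim_equal_dfs_edges := by
  intro graphs source depth_limit _ _
  unfold Spec_dfs_edges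
  exact dfs_edges_eq_alt graphs source depth_limit
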